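-- pv_equiv track=rewrite | github.com/drdnaz/ce206-hw-durdanenaz-babaoglu-java | coverage_report_lcov.py | parse_lcov_data
-- ===== SOURCE A (Python) =====
-- def parse_lcov_data(lcov_data):
--     files = {}
--     current_file = None
--     for line in lcov_data.splitlines():
--         line = line.strip()
--         if line.startswith("SF:"):
--             current_file = line[3:]
--             files[current_file] = {'covered': 0, 'total': 0}
--         elif line.startswith("DA:"):
--             if current_file is None:
--                 continue
--             parts = line[3:].split(',')
--             is_covered = int(parts[1]) > 0
--             if is_covered:
--                 files[current_file]['covered'] += 1
--             files[current_file]['total'] += 1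
--     return files
-- ===== SOURCE B (Python) =====
-- def parse_lcov_data(lcov_data):
--     lines = [l.strip() for l in lcov_data.splitlines()]
--     files = {}
--     i = 0
--     n = len(lines)
--     while i < n:
--         line = lines[i]
--         if not line.startswith("SF:"):
--             i += 1
--             continue
--         j = i + 1
--         while j < n and not lines[j].startswith("SF:"):
--             j += 1
--         das = [x for x in lines[i + 1:j] if x.startswith("DA:")]
--         covered = sum(1 for d in das if int(d[3:].split(',')[1]) > 0)
--         files[line[3:]] = {'covered': covered, 'total': len(das)}
--         i = j
--     return files
-- ===== Notes on version B (the rewrite author's own statement) =====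
-- stated objective: alternative
-- what changed: A is a single stateful scan carrying a current-file register and mutating per-file counters line by line; B first cuts the stripped lines into per-SF blocks and then computes each block's covered/total counts in one go, inserting the finished record per block.
import Mathlib
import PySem

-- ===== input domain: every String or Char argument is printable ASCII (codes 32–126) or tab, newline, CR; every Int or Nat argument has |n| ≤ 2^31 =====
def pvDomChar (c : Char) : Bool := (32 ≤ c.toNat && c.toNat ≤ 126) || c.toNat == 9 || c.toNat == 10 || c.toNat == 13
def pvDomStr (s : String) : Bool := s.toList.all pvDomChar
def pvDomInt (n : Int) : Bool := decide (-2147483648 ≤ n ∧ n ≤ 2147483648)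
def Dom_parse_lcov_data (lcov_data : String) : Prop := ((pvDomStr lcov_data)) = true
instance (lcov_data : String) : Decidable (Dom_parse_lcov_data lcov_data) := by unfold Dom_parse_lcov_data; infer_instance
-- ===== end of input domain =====

-- B replaces A's single stateful scan (current-file register, per-line dict mutation) by a
-- two-phase decomposition: cut the stripped lines into per-source-file blocks, then count each block's
-- data lines at once; same results, objective 'alternative' (no speed claim).

-- ===== PORT A =====
-- single scan; state = (files dict, current_file)
def parse_lcov_data (lcov_data : String) : List (String × List (String × Int)) :=
  let res := (PySem.Str.splitlines lcov_data).foldl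
    (fun (st : PySem.Dict String (PySem.Dict String Int) × Option String) rawline =>
      let line := PySem.Str.strip rawline
      if PySem.Str.startswith line "SF:" then
        let cf := PySem.Str.slice line (some 3) none
        (st.1.insert cf (PySem.Dict.ofList [("covered", (0 : Int)), ("total", (0 : Int))]), some cf)
      else if PySem.Str.startswith line "DA:" then
        match st.2 with
        | none => st
        | some cf =>
          let parts := PySem.Chars.splitOn (PySem.Str.slice line (some 3) none).toList [',']
          let isCovered := decide ((0 : Int) < (PySem.Int.ofChars? (PySem.List.pyGetD parts 1 [])).getD 0)
          let f1 := if isCovered then st.1.modify cf PySem.Dict.empty (fun d => d.modify "covered" 0 (· + 1)) else st.1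
          (f1.modify cf PySem.Dict.empty (fun d => d.modify "total" 0 (· + 1)), some cf)
      else st)
    (PySem.Dict.empty, none)
  res.1.items.map (fun p => (p.1, p.2.items))

-- ===== PORT B =====
-- int(d[3:].split(',')[1]) > 0  for a data line d (total form; Pre_ excludes the raising lines)
def alt_daCovered (d : String) : Bool :=
  decide ((0 : Int) < (PySem.Int.ofChars? (PySem.List.pyGetD (PySem.Chars.splitOn (PySem.Str.slice d (some 3) none).toList [',']) 1 [])).getD 0)

-- the while-loop of Source B: skip lines before the first source-file record; on a record line take
-- its block (lines up to the next record), count it, insert, continue after the block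
def alt_go (files : PySem.Dict String (PySem.Dict String Int)) :
    List String → PySem.Dict String (PySem.Dict String Int)
  | [] => files
  | line :: rest =>
    if PySem.Str.startswith line "SF:" then
      let das := (rest.takeWhile (fun x => !PySem.Str.startswith x "SF:")).filter
                   (fun x => PySem.Str.startswith x "DA:")
      let covered : Int := das.countP alt_daCovered
      alt_go (files.insert (PySem.Str.slice line (some 3) none)
               (PySem.Dict.ofList [("covered", covered), ("total", (das.length : Int))]))
             (rest.dropWhile (fun x => !PySem.Str.startswith x "SF:"))
    else alt_go files rest
termination_by ls => ls.length
decreasing_by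
  · simpa using Nat.lt_succ_of_le (List.length_dropWhile_le _ _)
  · simp

def parse_lcov_data_alt (lcov_data : String) : List (String × List (String × Int)) :=
  let lines := (PySem.Str.splitlines lcov_data).map PySem.Str.strip
  (alt_go PySem.Dict.empty lines).items.map (fun p => (p.1, p.2.items))

-- ===== PRECONDITION & SPEC =====
-- Pre_ excludes exactly the inputs where Python A raises: a DA line that lies after some SF
-- record line (so it is parsed) whose payload has no second comma-field or whose second field
-- is not an int literal (IndexError / ValueError in int(parts[1])).
def Pre_parse_lcov_data (lcov_data : String) : Prop :=
  ∀ i : Fin ((PySem.Str.splitlines lcov_data).map PySem.Str.strip).length,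
    PySem.Str.startswith (((PySem.Str.splitlines lcov_data).map PySem.Str.strip).get i) "DA:" = true →
    (∃ j : Fin ((PySem.Str.splitlines lcov_data).map PySem.Str.strip).length, j.val < i.val ∧
      PySem.Str.startswith (((PySem.Str.splitlines lcov_data).map PySem.Str.strip).get j) "SF:" = true) →
    (1 < (PySem.Chars.splitOn (PySem.Str.slice (((PySem.Str.splitlines lcov_data).map PySem.Str.strip).get i) (some 3) none).toList [',']).length ∧
     (PySem.Int.ofChars? (PySem.List.pyGetD (PySem.Chars.splitOn (PySem.Str.slice (((PySem.Str.splitlines lcov_data).map PySem.Str.strip).get i) (some 3) none).toList [',']) 1 [])).isSome = true)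
instance (lcov_data : String) : Decidable (Pre_parse_lcov_data lcov_data) := by
  unfold Pre_parse_lcov_data; infer_instance

def pvWitness_parse_lcov_data : String := "SF:a.c\nDA:1,1\nDA:2,0\nend_of_record"

def Spec_parse_lcov_data (lcov_data : String) (out : List (String × List (String × Int))) : Prop := out = parse_lcov_data_alt lcov_data
instance (lcov_data : String) (out : List (String × List (String × Int))) : Decidable (Spec_parse_lcov_data lcov_data out) := by unfold Spec_parse_lcov_data; infer_instance

-- ===== CLAIM (what is proved, stated in full; the proofs are below) =====
def Claim_equal_parse_lcov_data : Prop := ∀ (lcov_data : String), Dom_parse_lcov_data lcov_data → Pre_parse_lcov_data lcov_data → Spec_parse_lcov_data lcov_data (parse_lcov_data lcov_data)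

-- ===== LEMMAS AND PROOFS =====

-- A's loop body on an already-stripped line
def aStep (st : PySem.Dict String (PySem.Dict String Int) × Option String) (line : String) :
    PySem.Dict String (PySem.Dict String Int) × Option String :=
  if PySem.Str.startswith line "SF:" then
    let cf := PySem.Str.slice line (some 3) none
    (st.1.insert cf (PySem.Dict.ofList [("covered", (0 : Int)), ("total", (0 : Int))]), some cf)
  else if PySem.Str.startswith line "DA:" then
    match st.2 with
    | none => st
    | some cf =>
      let parts := PySem.Chars.splitOn (PySem.Str.slice line (some 3) none).toList [',']
      let isCovered := decide ((0 : Int) < (PySem.Int.ofChars? (PySem.List.pyGetD parts 1 [])).getD 0)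
      let f1 := if isCovered then st.1.modify cf PySem.Dict.empty (fun d => d.modify "covered" 0 (· + 1)) else st.1
      (f1.modify cf PySem.Dict.empty (fun d => d.modify "total" 0 (· + 1)), some cf)
  else st

def mkD (c t : Int) : PySem.Dict String Int :=
  PySem.Dict.ofList [("covered", c), ("total", t)]

def dasOf (ls : List String) : List String :=
  (ls.takeWhile (fun x => !PySem.Str.startswith x "SF:")).filter
    (fun x => PySem.Str.startswith x "DA:")

theorem mkD_cov (c t : Int) : (mkD c t).modify "covered" 0 (· + 1) = mkD (c + 1) t := by
  simp [mkD, PySem.Dict.modify, PySem.Dict.ofList, PySem.Dict.update, PySem.Dict.insert,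
        PySem.Dict.getD, PySem.Dict.get?, PySem.Dict.empty, PySem.Dict.contains]

theorem mkD_tot (c t : Int) : (mkD c t).modify "total" 0 (· + 1) = mkD c (t + 1) := by
  simp [mkD, PySem.Dict.modify, PySem.Dict.ofList, PySem.Dict.update, PySem.Dict.insert,
        PySem.Dict.getD, PySem.Dict.get?, PySem.Dict.empty, PySem.Dict.contains]

theorem modify_insert_self (f : PySem.Dict String (PySem.Dict String Int)) (k : String)
    (d : PySem.Dict String Int) (g : PySem.Dict String Int → PySem.Dict String Int) :
    (f.insert k d).modify k PySem.Dict.empty g = f.insert k (g d) := by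
  simp [PySem.Dict.modify, PySem.Dict.insert_insert_self]

theorem lemma2 (ls : List String) :
    ∀ (f : PySem.Dict String (PySem.Dict String Int)) (cf : String) (c t : Int),
    (List.foldl aStep (f.insert cf (mkD c t), some cf) ls).1
    = alt_go (f.insert cf (mkD (c + ((dasOf ls).countP alt_daCovered : Int))
                               (t + ((dasOf ls).length : Int))))
             (ls.dropWhile (fun x => !PySem.Str.startswith x "SF:")) := by
  induction ls with
  | nil => intro f cf c t; simp [dasOf, alt_go]
  | cons l ls ih =>
    intro f cf c t
    by_cases hSF : PySem.Chars.startswith l.toList ['S','F',':'] = true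
    · have e : aStep (f.insert cf (mkD c t), some cf) l
          = ((f.insert cf (mkD c t)).insert (PySem.Str.slice l (some 3) none) (mkD 0 0),
             some (PySem.Str.slice l (some 3) none)) := by
        simp [aStep, mkD, hSF]
      simp only [List.foldl_cons, e]
      rw [ih]
      have hdas : dasOf (l :: ls) = [] := by simp [dasOf, hSF]
      have hdrop : (l :: ls).dropWhile (fun x => !PySem.Str.startswith x "SF:") = l :: ls := by
        simp [List.dropWhile, hSF]
      rw [hdas, hdrop, alt_go]
      simp [hSF, dasOf, mkD]
    · by_cases hDA : PySem.Chars.startswith l.toList ['D','A',':'] = true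
      · have hS : PySem.Str.startswith l "SF:" = false := by simpa using hSF
        have hD : PySem.Str.startswith l "DA:" = true := by simpa using hDA
        have e : aStep (f.insert cf (mkD c t), some cf) l
            = (f.insert cf (mkD (c + (if alt_daCovered l then 1 else 0)) (t + 1)), some cf) := by
          cases hc : alt_daCovered l with
          | true =>
            have hc' := hc
            simp only [alt_daCovered, decide_eq_true_eq, PySem.Chars.slice_eq_listSlice,
                       PySem.Str.toList_slice] at hc'
            simp [aStep, hSF, hDA, hc', modify_insert_self, mkD_cov, mkD_tot]
          | false =>
            have hc' := hc
            simp only [alt_daCovered, decide_eq_false_iff_not, PySem.Chars.slice_eq_listSlice,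
                       PySem.Str.toList_slice] at hc'
            simp [aStep, hSF, hDA, hc', modify_insert_self, mkD_tot]
        simp only [List.foldl_cons, e]
        rw [ih]
        have hdas : dasOf (l :: ls) = l :: dasOf ls := by
          simp [dasOf, List.takeWhile, hSF, hDA]
        have hdrop : (l :: ls).dropWhile (fun x => !PySem.Str.startswith x "SF:")
            = ls.dropWhile (fun x => !PySem.Str.startswith x "SF:") := by
          simp [List.dropWhile, hSF]
        rw [hdas, hdrop]
        have hcov : c + (if alt_daCovered l then (1 : Int) else 0) + (((dasOf ls).countP alt_daCovered : Nat) : Int)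
            = c + (((l :: dasOf ls).countP alt_daCovered : Nat) : Int) := by
          rw [List.countP_cons]
          cases alt_daCovered l
          · simp
          · simp
            omega
        have hlen : t + 1 + (((dasOf ls).length : Nat) : Int)
            = t + (((l :: dasOf ls).length : Nat) : Int) := by
          push_cast [List.length_cons]
          ring
        rw [hcov, hlen]
      · have e : aStep (f.insert cf (mkD c t), some cf) l = (f.insert cf (mkD c t), some cf) := by
          simp [aStep, hSF, hDA]
        simp only [List.foldl_cons, e]
        rw [ih]
        have hdas : dasOf (l :: ls) = dasOf ls := by
          simp [dasOf, List.takeWhile, hSF, hDA]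
        have hdrop : (l :: ls).dropWhile (fun x => !PySem.Str.startswith x "SF:")
            = ls.dropWhile (fun x => !PySem.Str.startswith x "SF:") := by
          simp [List.dropWhile, hSF]
        rw [hdas, hdrop]

theorem lemma1 (ls : List String) :
    ∀ (f : PySem.Dict String (PySem.Dict String Int)),
    (List.foldl aStep (f, none) ls).1 = alt_go f ls := by
  induction ls with
  | nil => intro f; simp [alt_go]
  | cons l ls ih =>
    intro f
    by_cases hSF : PySem.Chars.startswith l.toList ['S','F',':'] = true
    · have e : aStep (f, none) l
          = (f.insert (PySem.Str.slice l (some 3) none) (mkD 0 0),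
             some (PySem.Str.slice l (some 3) none)) := by
        simp [aStep, mkD, hSF]
      simp only [List.foldl_cons, e]
      rw [lemma2]
      rw [alt_go]
      simp [hSF, dasOf, mkD]
    · by_cases hDA : PySem.Chars.startswith l.toList ['D','A',':'] = true
      · simp only [List.foldl_cons, aStep]
        rw [alt_go]
        simp [hSF, hDA, ih]
      · simp only [List.foldl_cons, aStep]
        rw [alt_go]
        simp [hSF, hDA, ih]

-- ===== VERDICT (by name: the statement is the Claim_ definition above) =====
theorem parse_lcov_data_spec : Claim_equal_parse_lcov_data := by
  intro s _ _
  unfold Spec_parse_lcov_data parse_lcov_data parse_lcov_data_alt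
  change (List.map (fun p => (p.1, p.2.items))
      ((PySem.Str.splitlines s).foldl (fun st raw => aStep st (PySem.Str.strip raw))
        ((PySem.Dict.empty : PySem.Dict String (PySem.Dict String Int)), (none : Option String))).1.items)
    = List.map (fun p => (p.1, p.2.items))
        (alt_go PySem.Dict.empty ((PySem.Str.splitlines s).map PySem.Str.strip)).items
  rw [← List.foldl_map, lemma1]
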